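-- pv_equiv track=rewrite | github.com/nk-knvlv/courses_stuff | src/tasks_5.py | get_increase_intervals_count
-- ===== SOURCE A (Python) =====
-- def get_increase_intervals_count(num_list):
--     if len(num_list) < 2:
--         return 0
--     inc_intervals_count = 0
--     is_increase = False
--     for i in range(1, len(num_list)):
--         if num_list[i] > num_list[i - 1]:
--             if not is_increase:
--                 is_increase = True
--                 inc_intervals_count += 1
--         else:
--             is_increase = False
--     return inc_intervals_count
-- ===== SOURCE B (Python) =====
-- def get_increase_intervals_count(num_list):
--     # Partition the list into maximal strictly increasing runs (actual list-of-lists),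
--     # then count the runs that contain more than one element.
--     runs = []
--     for x in num_list:
--         if runs and x > runs[-1][-1]:
--             runs[-1].append(x)
--         else:
--             runs.append([x])
--     return sum(1 for r in runs if len(r) > 1)
-- ===== Notes on version B (the rewrite author's own statement) =====
-- stated objective: alternative
-- what changed: Replaces A's flag-and-counter edge scan by building the explicit partition of the list into maximal strictly increasing runs and then counting the runs of length greater than one.
import Mathlib
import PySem

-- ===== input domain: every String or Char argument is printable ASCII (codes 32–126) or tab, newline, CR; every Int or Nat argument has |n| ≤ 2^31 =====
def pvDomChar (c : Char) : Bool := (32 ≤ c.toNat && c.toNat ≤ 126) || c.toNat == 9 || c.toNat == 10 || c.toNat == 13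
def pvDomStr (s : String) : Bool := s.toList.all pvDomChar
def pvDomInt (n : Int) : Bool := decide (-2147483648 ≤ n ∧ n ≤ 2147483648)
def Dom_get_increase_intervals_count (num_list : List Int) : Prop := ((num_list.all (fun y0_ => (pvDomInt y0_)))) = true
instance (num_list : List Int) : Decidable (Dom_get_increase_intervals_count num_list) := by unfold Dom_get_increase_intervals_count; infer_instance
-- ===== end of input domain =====

-- B builds the explicit partition of the list into maximal strictly increasing runs
-- and counts the runs of length > 1, instead of A's flag-and-counter edge scan; objective: alternative.

-- ===== PORT A =====
def get_increase_intervals_count (num_list : List Int) : Int :=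
  if num_list.length < 2 then 0
  else
    ((PySem.List.pyRange 1 (num_list.length) 1).foldl
      (fun (s : Int × Bool) i =>
        if PySem.List.pyGetD num_list (i - 1) 0 < PySem.List.pyGetD num_list i 0 then
          if !s.2 then (s.1 + 1, true) else (s.1, s.2)
        else (s.1, false))
      (0, false)).1

-- ===== PORT B =====
-- one step of Source B's run-building loop: extend the last run if x rises above its last element
def pvRunsStep (runs : List (List Int)) (x : Int) : List (List Int) :=
  match runs.getLast? with
  | some r =>
    match r.getLast? with
    | some y => if y < x then runs.dropLast ++ [r ++ [x]] else runs ++ [[x]]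
    | none => runs ++ [[x]]          -- unreachable: runs never contains an empty run
  | none => runs ++ [[x]]

def get_increase_intervals_count_alt (num_list : List Int) : Int :=
  (((num_list.foldl pvRunsStep []).filter (fun r => 1 < r.length)).length : Int)

-- ===== PRECONDITION & SPEC =====
def Spec_get_increase_intervals_count (num_list : List Int) (out : Int) : Prop := out = get_increase_intervals_count_alt num_list
instance (num_list : List Int) (out : Int) : Decidable (Spec_get_increase_intervals_count num_list out) := by unfold Spec_get_increase_intervals_count; infer_instance

-- ===== CLAIM (what is proved, stated in full; the proofs are below) =====
def Claim_equal_get_increase_intervals_count : Prop := ∀ (num_list : List Int), Dom_get_increase_intervals_count num_list → Spec_get_increase_intervals_count num_list (get_increase_intervals_count num_list)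

-- ===== LEMMAS AND PROOFS =====

-- A's index loop over range(1, len) equals a fold over the list of adjacent pairs.
theorem pv_idx_fold {σ : Type} (l : List Int) (g : σ → Int → Int → σ) :
    ∀ (j : Nat) (s : σ),
      (PySem.List.pyRange ((j : Int) + 1) (l.length) 1).foldl
          (fun s i => g s (PySem.List.pyGetD l (i - 1) 0) (PySem.List.pyGetD l i 0)) s
        = ((l.drop j).zip (l.drop (j + 1))).foldl (fun s p => g s p.1 p.2) s := by
  intro j
  induction hn : l.length - j generalizing j with
  | zero =>
    intro s
    have hj : l.length ≤ j := by omega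
    rw [PySem.List.pyRange_one_eq_nil (by exact_mod_cast (by omega : (l.length : Int) ≤ (j : Int) + 1))]
    rw [List.drop_eq_nil_of_le hj]
    simp
  | succ n ih =>
    intro s
    have hj : j < l.length := by omega
    by_cases hj1 : j + 1 < l.length
    · rw [PySem.List.pyRange_one_cons (by exact_mod_cast hj1)]
      have h1 : ((j : Int) + 1) - 1 = (j : Int) := by ring
      have e1 : PySem.List.pyGetD l ((j : Int) + 1 - 1) 0 = l[j] := by
        rw [h1]; simp [PySem.List.pyGetD_natCast, List.getD_eq_getElem?_getD, hj]
      have e2 : PySem.List.pyGetD l ((j : Int) + 1) 0 = l[j + 1] := by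
        rw [show ((j : Int) + 1) = ((j + 1 : Nat) : Int) by push_cast; ring,
          PySem.List.pyGetD_natCast]
        simp [List.getD_eq_getElem?_getD, hj1]
      have d1 : l.drop j = l[j] :: l.drop (j + 1) := List.drop_eq_getElem_cons hj
      have d2 : l.drop (j + 1) = l[j + 1] :: l.drop (j + 2) := List.drop_eq_getElem_cons hj1
      rw [List.foldl_cons, e1, e2]
      rw [d1, d2, List.zip_cons_cons, List.foldl_cons, ← d2]
      have := ih (j + 1) (by omega)
      rw [show ((j : Int) + 1 + 1) = ((j + 1 : Nat) : Int) + 1 by push_cast; ring]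
      exact this _
    · have hj1' : l.length = j + 1 := by omega
      rw [PySem.List.pyRange_one_eq_nil (by exact_mod_cast (by omega : (l.length : Int) ≤ (j : Int) + 1))]
      rw [List.drop_eq_nil_of_le (by omega : l.length ≤ j + 1)]
      simp

-- count of long runs, as an Int
def pvCnt (R : List (List Int)) : Int := ((R.filter (fun r => 1 < r.length)).length : Int)

theorem pvCnt_append (X : List (List Int)) (r : List Int) :
    pvCnt (X ++ [r]) = pvCnt X + if 1 < r.length then 1 else 0 := by
  by_cases h : 1 < r.length <;> simp [pvCnt, List.filter_append, h]

-- core invariant: with the runs list split as X ++ [r] (r the current run, last element y),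
-- B's remaining run-building equals A's flag scan over the remaining adjacent pairs,
-- the flag being «the current run is already long».
theorem pv_runs (xs : List Int) :
    ∀ (X : List (List Int)) (r : List Int) (y : Int), r.getLast? = some y →
      pvCnt (xs.foldl pvRunsStep (X ++ [r]))
        = ((( (y :: xs).zip xs ).foldl
            (fun (s : Int × Bool) p =>
              if p.1 < p.2 then (if !s.2 then (s.1 + 1, true) else (s.1, s.2)) else (s.1, false))
            (pvCnt (X ++ [r]), decide (1 < r.length))).1) := by
  induction xs with
  | nil => intro X r y hy; simp
  | cons x xs ih =>
    intro X r y hy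
    have hr : r ≠ [] := by intro h; simp [h] at hy
    have hstep : pvRunsStep (X ++ [r]) x =
        if y < x then X ++ [r ++ [x]] else (X ++ [r]) ++ [[x]] := by
      simp [pvRunsStep, hy]
    rw [List.zip_cons_cons, List.foldl_cons, List.foldl_cons, hstep]
    by_cases hyx : y < x
    · rw [if_pos hyx]
      have hlen1 : 1 ≤ r.length := List.length_pos_iff.mpr hr
      have hgt : 1 < (r ++ [x]).length := by simp; omega
      have e1 : pvCnt (X ++ [r ++ [x]]) =
          pvCnt (X ++ [r]) + (if !decide (1 < r.length) then 1 else 0) := by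
        rw [pvCnt_append, pvCnt_append, if_pos hgt]
        by_cases hf : 1 < r.length <;> simp [hf]
      rw [ih X (r ++ [x]) x (by simp)]
      simp only [if_pos hyx]
      congr 1
      have h0 : 0 < r.length := by omega
      by_cases hf : 1 < r.length <;> simp [hf, e1, h0]
    · rw [if_neg hyx]
      rw [ih (X ++ [r]) [x] x (by simp)]
      simp only [if_neg hyx]
      congr 1
      have e2 : pvCnt (X ++ [r, [x]]) = pvCnt (X ++ [r]) := by
        rw [show X ++ [r, [x]] = (X ++ [r]) ++ [[x]] by simp, pvCnt_append]; simp
      simp [e2]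

theorem pv_main (l : List Int) : get_increase_intervals_count l = get_increase_intervals_count_alt l := by
  unfold get_increase_intervals_count get_increase_intervals_count_alt
  by_cases h2 : l.length < 2
  · rw [if_pos h2]
    match l, h2 with
    | [], _ => rfl
    | [x], _ => simp [pvRunsStep]
  · rw [if_neg h2]
    match l, h2 with
    | h :: t, _ =>
      have key := pv_idx_fold (h :: t) (fun (s : Int × Bool) a b =>
        if a < b then (if !s.2 then (s.1 + 1, true) else (s.1, s.2)) else (s.1, false)) 0 (0, false)
      simp only [Nat.cast_zero, zero_add, List.drop_zero, List.drop_one] at key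
      rw [key]
      have hb : (h :: t).foldl pvRunsStep [] = t.foldl pvRunsStep ([] ++ [[h]]) := by
        simp [pvRunsStep]
      rw [hb]
      have h3 := pv_runs t ([]) [h] h (by simp)
      simp only [pvCnt] at h3
      rw [h3]
      simp

-- ===== VERDICT (by name: the statement is the Claim_ definition above) =====
theorem get_increase_intervals_count_spec : Claim_equal_get_increase_intervals_count := by
  intro l _
  unfold Spec_get_increase_intervals_count
  exact pv_main l
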